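-- pv_equiv track=rewrite | github.com/costamay/codility-practice | skills3_correct.py | solution
-- ===== SOURCE A (Python) =====
-- def solution(skills):
--     n = len(skills)
--     results = {player: 1 for player in range(n)}
--     c_round = 1
--     c_matches = [player for player in range(n)]
--     while len(c_matches) > 1:
--         n_matches = []
--         i = 0
--         while i < len(c_matches) - 1:
--             p1, p2 = c_matches[i], c_matches[i + 1]
--             winner = max(p1, p2, key=lambda x: skills[x])
--             loser = min(p1, p2, key=lambda x: skills[x])
--             n_matches.append(winner)
--             results[loser] = c_round
--             i += 2
--         c_matches = n_matches
--         if len(c_matches) > 1: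
--             c_round += 1
--     winner = c_matches[0]
--     results[winner] = c_round
--     return list(results.values())
-- ===== SOURCE B (Python) =====
-- def solution(skills):
--     results = {player: 1 for player in range(len(skills))}
--
--     def play(survivors, rnd):
--         if len(survivors) <= 1:
--             results[survivors[0]] = rnd
--             return
--         winners = []
--         for p1, p2 in zip(survivors[::2], survivors[1::2]):
--             winners.append(p2 if skills[p2] > skills[p1] else p1)
--             results[p2 if skills[p1] > skills[p2] else p1] = rnd
--         play(winners, rnd + 1 if len(winners) > 1 else rnd)
--
--     play(list(range(len(skills))), 1)
--     return list(results.values())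
-- ===== Notes on version B (the rewrite author's own statement) =====
-- stated objective: alternative
-- what changed: Replaced A's two nested index-driven while loops with a recursive bracket descent play(survivors, rnd) that pairs adjacent survivors via zip over a single iterator and recurses on the winners.
import Mathlib
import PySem

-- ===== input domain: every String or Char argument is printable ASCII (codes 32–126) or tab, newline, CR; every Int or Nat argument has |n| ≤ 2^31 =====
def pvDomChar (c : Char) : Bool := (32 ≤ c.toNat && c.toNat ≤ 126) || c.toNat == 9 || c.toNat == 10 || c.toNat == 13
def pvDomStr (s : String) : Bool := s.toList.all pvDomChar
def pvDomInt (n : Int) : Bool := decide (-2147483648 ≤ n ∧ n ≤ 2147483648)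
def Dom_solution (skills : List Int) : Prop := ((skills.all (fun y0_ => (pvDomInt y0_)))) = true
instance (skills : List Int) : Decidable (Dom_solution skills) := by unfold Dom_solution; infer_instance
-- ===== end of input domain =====

-- B re-decomposes A's two nested while loops as a recursive bracket descent
-- (`play(survivors, rnd)` pairing via zip of an iterator), same values everywhere A returns.

-- skills[x]; every player index used by either program lies in range(len(skills)),
-- so the .getD 0 default is never consulted on the claimed domain.
def pvSkill (skills : List Int) (p : Int) : Int := (PySem.List.pyGet? skills p).getD 0

-- ===== PORT A =====
-- inner `while i < len(c_matches) - 1` loop: consumes c_matches two at a time,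
-- appending the winner and recording the loser at the current round
def pvRoundA (skills : List Int) (cround : Int) :
    List Int → PySem.Dict Int Int → List Int × PySem.Dict Int Int
  | p1 :: p2 :: rest, results =>
      let winner := if pvSkill skills p2 > pvSkill skills p1 then p2 else p1
      let loser := if pvSkill skills p2 < pvSkill skills p1 then p2 else p1
      let rec' := pvRoundA skills cround rest (results.insert loser cround)
      (winner :: rec'.1, rec'.2)
  | _, results => ([], results)

theorem pvRoundA_fst_length (skills : List Int) (cround : Int) :
    ∀ (l : List Int) (r : PySem.Dict Int Int),
      ((pvRoundA skills cround l r).1).length = l.length / 2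
  | p1 :: p2 :: rest, r => by
      simp [pvRoundA, pvRoundA_fst_length skills cround rest]; omega
  | [], _ => by simp [pvRoundA]
  | [_], _ => by simp [pvRoundA]

-- outer `while len(c_matches) > 1` loop
def pvLoopA (skills : List Int) (cmatches : List Int) (cround : Int)
    (results : PySem.Dict Int Int) : List Int × Int × PySem.Dict Int Int :=
  if 1 < cmatches.length then
    let st := pvRoundA skills cround cmatches results
    pvLoopA skills st.1 (if 1 < st.1.length then cround + 1 else cround) st.2
  else (cmatches, cround, results)
termination_by cmatches.length
decreasing_by simp only [pvRoundA_fst_length]; omega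

def solution (skills : List Int) : List Int :=
  let n : Int := skills.length
  let results := (PySem.List.pyRange 0 n 1).foldl
    (fun (d : PySem.Dict Int Int) p => d.insert p 1) PySem.Dict.empty
  let st := pvLoopA skills (PySem.List.pyRange 0 n 1) 1 results
  match st.1 with
  | w :: _ => (st.2.2.insert w st.2.1).values
  | [] => []  -- c_matches[0] raises IndexError in Python here (skills = []); excluded by Pre_

-- ===== PORT B =====
-- zip(it, it) over an iterator: the list of adjacent pairs, trailing odd element dropped
def pvAdjPairs : List Int → List (Int × Int)
  | a :: b :: rest => (a, b) :: pvAdjPairs rest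
  | _ => []

theorem pvAdjPairs_length : ∀ (l : List Int), (pvAdjPairs l).length = l.length / 2
  | _ :: _ :: rest => by simp [pvAdjPairs, pvAdjPairs_length rest]; omega
  | [] => by simp [pvAdjPairs]
  | [_] => by simp [pvAdjPairs]

-- the `for p1, p2 in zip(it, it)` loop body of play: winners appended, losers recorded
theorem pvStepB_eq (skills : List Int) (rnd : Int) (pairs : List (Int × Int))
    (results : PySem.Dict Int Int) :
    (pairs.foldl (fun (acc : List Int × PySem.Dict Int Int) pq =>
        (acc.1 ++ [if pvSkill skills pq.2 > pvSkill skills pq.1 then pq.2 else pq.1],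
         acc.2.insert (if pvSkill skills pq.2 < pvSkill skills pq.1 then pq.2 else pq.1) rnd))
      ([], results))
    = (pairs.map (fun pq => if pvSkill skills pq.2 > pvSkill skills pq.1 then pq.2 else pq.1),
       pairs.foldl (fun (d : PySem.Dict Int Int) pq =>
         d.insert (if pvSkill skills pq.2 < pvSkill skills pq.1 then pq.2 else pq.1) rnd) results) := by
  have gen : ∀ (ps : List (Int × Int)) (ws : List Int) (r : PySem.Dict Int Int),
      (ps.foldl (fun (acc : List Int × PySem.Dict Int Int) pq =>
          (acc.1 ++ [if pvSkill skills pq.2 > pvSkill skills pq.1 then pq.2 else pq.1],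
           acc.2.insert (if pvSkill skills pq.2 < pvSkill skills pq.1 then pq.2 else pq.1) rnd))
        (ws, r))
      = (ws ++ ps.map (fun pq => if pvSkill skills pq.2 > pvSkill skills pq.1 then pq.2 else pq.1),
         ps.foldl (fun (d : PySem.Dict Int Int) pq =>
           d.insert (if pvSkill skills pq.2 < pvSkill skills pq.1 then pq.2 else pq.1) rnd) r) := by
    intro ps
    induction ps with
    | nil => simp
    | cons pq rest ihp => intro ws r; simp [ihp]
  simpa using gen pairs [] results

-- recursive bracket helper `play(survivors, rnd)`
def pvPlayB (skills : List Int) (survivors : List Int) (rnd : Int)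
    (results : PySem.Dict Int Int) : PySem.Dict Int Int :=
  if survivors.length ≤ 1 then
    match survivors with
    | s :: _ => results.insert s rnd
    | [] => results  -- survivors[0] raises IndexError in Python here (skills = []); excluded by Pre_
  else
    let step := (pvAdjPairs survivors).foldl
      (fun (acc : List Int × PySem.Dict Int Int) pq =>
        (acc.1 ++ [if pvSkill skills pq.2 > pvSkill skills pq.1 then pq.2 else pq.1],
         acc.2.insert (if pvSkill skills pq.2 < pvSkill skills pq.1 then pq.2 else pq.1) rnd))
      ([], results)
    pvPlayB skills step.1 (if 1 < step.1.length then rnd + 1 else rnd) step.2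
termination_by survivors.length
decreasing_by
  simp only [dite_eq_ite]
  rw [pvStepB_eq skills rnd (pvAdjPairs survivors) results]
  simp only [List.length_map, pvAdjPairs_length]
  omega

def solution_alt (skills : List Int) : List Int :=
  let results := (PySem.List.pyRange 0 (skills.length : Int) 1).foldl
    (fun (d : PySem.Dict Int Int) p => d.insert p 1) PySem.Dict.empty
  (pvPlayB skills (PySem.List.pyRange 0 (skills.length : Int) 1) 1 results).values

-- ===== PRECONDITION & SPEC =====
-- Pre_ excludes only the empty list, on which A raises IndexError at `c_matches[0]`.
def Pre_solution (skills : List Int) : Prop := skills ≠ []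
instance (skills : List Int) : Decidable (Pre_solution skills) := by unfold Pre_solution; infer_instance
def pvWitness_solution : List Int := ([3, 1, 2] : List Int)

def Spec_solution (skills : List Int) (out : List Int) : Prop := out = solution_alt skills
instance (skills : List Int) (out : List Int) : Decidable (Spec_solution skills out) := by unfold Spec_solution; infer_instance

-- ===== CLAIM (what is proved, stated in full; the proofs are below) =====
def Claim_equal_solution : Prop := ∀ (skills : List Int), Dom_solution skills → Pre_solution skills → Spec_solution skills (solution skills)

-- ===== LEMMAS AND PROOFS =====

-- one round of A equals the map/fold over the adjacent pairs that one level of B computes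
theorem pvRoundA_eq (skills : List Int) (cround : Int) :
    ∀ (l : List Int) (r : PySem.Dict Int Int),
      pvRoundA skills cround l r
        = ((pvAdjPairs l).map (fun pq => if pvSkill skills pq.2 > pvSkill skills pq.1 then pq.2 else pq.1),
           (pvAdjPairs l).foldl (fun (d : PySem.Dict Int Int) pq =>
             d.insert (if pvSkill skills pq.2 < pvSkill skills pq.1 then pq.2 else pq.1) cround) r)
  | p1 :: p2 :: rest, r => by
      simp only [pvRoundA, pvAdjPairs, List.map_cons, List.foldl_cons]
      rw [pvRoundA_eq skills cround rest]
  | [], _ => by simp [pvRoundA, pvAdjPairs]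
  | [_], _ => by simp [pvRoundA, pvAdjPairs]

-- A's loop + final insert of the lone survivor = B's recursive play, for nonempty brackets
theorem pvMain (skills : List Int) :
    ∀ (n : Nat) (l : List Int), l.length ≤ n → l ≠ [] → ∀ (rnd : Int) (d : PySem.Dict Int Int),
      ∃ w t, (pvLoopA skills l rnd d).1 = w :: t ∧
        ((pvLoopA skills l rnd d).2.2).insert w ((pvLoopA skills l rnd d).2.1)
          = pvPlayB skills l rnd d := by
  intro n
  induction n with
  | zero =>
      intro l hlen hne rnd d
      cases l with
      | nil => exact absurd rfl hne
      | cons a t => simp at hlen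
  | succ n ih =>
      intro l hlen hne rnd d
      by_cases hlong : 1 < l.length
      · -- inductive bracket level
        have hstep := pvRoundA_eq skills rnd l d
        rw [pvLoopA, if_pos hlong, pvPlayB.eq_def, if_neg (show ¬ l.length ≤ 1 by omega)]
        simp only [pvStepB_eq, hstep]
        set ws := (pvAdjPairs l).map
          (fun pq => if pvSkill skills pq.2 > pvSkill skills pq.1 then pq.2 else pq.1) with hws
        set d' := (pvAdjPairs l).foldl (fun (d : PySem.Dict Int Int) pq =>
          d.insert (if pvSkill skills pq.2 < pvSkill skills pq.1 then pq.2 else pq.1) rnd) d with hd'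
        have hlw : ws.length = l.length / 2 := by
          rw [hws, List.length_map, pvAdjPairs_length]
        have hwsne : ws ≠ [] := by
          intro h; rw [h] at hlw; simp at hlw; omega
        have hwsle : ws.length ≤ n := by omega
        exact ih ws hwsle hwsne (if 1 < ws.length then rnd + 1 else rnd) d'
      · -- lone survivor
        cases l with
        | nil => exact absurd rfl hne
        | cons s t =>
          cases t with
          | nil =>
              rw [pvLoopA]
              refine ⟨s, [], by simp, ?_⟩
              rw [pvPlayB.eq_def]
              simp
          | cons b u => simp at hlong

theorem pvRange_ne_nil (skills : List Int) (h : skills ≠ []) :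
    PySem.List.pyRange 0 (skills.length : Int) 1 ≠ [] := by
  intro hn
  have := PySem.List.length_pyRange_one 0 (skills.length : Int)
  rw [hn] at this
  simp at this
  exact h (List.eq_nil_of_length_eq_zero (by omega))

-- ===== VERDICT (by name: the statement is the Claim_ definition above) =====
theorem solution_spec : Claim_equal_solution := by
  intro skills _ hpre
  unfold Spec_solution solution solution_alt
  obtain ⟨w, t, h1, h2⟩ := pvMain skills
    (PySem.List.pyRange 0 (skills.length : Int) 1).length
    (PySem.List.pyRange 0 (skills.length : Int) 1) le_rfl
    (pvRange_ne_nil skills hpre) 1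
    ((PySem.List.pyRange 0 (skills.length : Int) 1).foldl
      (fun (d : PySem.Dict Int Int) p => d.insert p 1) PySem.Dict.empty)
  simp only [h1, ← h2]
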